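-- pv_equiv track=rewrite | github.com/WillKeWang/Wearable_Mental_Causal | plot_causal_diagram_2.py | filter_edges_by_relevance
-- ===== SOURCE A (Python) =====
-- def find_ancestors(target_nodes, edges):
--     """Find all ancestors (nodes with paths to target) in directed graph."""
--     ancestors = set(target_nodes)
--     changed = True
--
--     while changed:
--         changed = False
--         for (source, target) in edges.keys():
--             if target in ancestors and source not in ancestors:
--                 ancestors.add(source)
--                 changed = True
--
--     return ancestors
--
-- def find_descendants(source_nodes, edges):
--     """Find all descendants (nodes reachable from source) in directed graph."""
--     descendants = set(source_nodes)
--     changed = True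
--
--     while changed:
--         changed = False
--         for (source, target) in edges.keys():
--             if source in descendants and target not in descendants:
--                 descendants.add(target)
--                 changed = True
--
--     return descendants
--
-- def filter_edges_by_relevance(edges, target_vars, direction='before'):
--     """Filter edges to include only those relevant to target variables."""
--     if direction == 'before':
--         # Find all ancestors of target variables
--         relevant_nodes = find_ancestors(target_vars, edges)
--     else:  # 'after'
--         # Find all descendants of target variables
--         relevant_nodes = find_descendants(target_vars, edges)
--
--     # Filter edges to only include those between relevant nodes
--     filtered_edges = {
--         (source, target): pct
--         for (source, target), pct in edges.items()
--         if source in relevant_nodes and target in relevant_nodes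
--     }
--
--     return filtered_edges
-- ===== SOURCE B (Python) =====
-- def filter_edges_by_relevance(edges, target_vars, direction='before'):
--     """Filter edges to include only those relevant to target variables.
--
--     Single reachability search: orient each edge toward the nodes we must
--     collect (reverse edges for 'before' = ancestors, forward otherwise),
--     index them in an adjacency dict, and walk from the targets with a stack.
--     """
--     if direction == 'before':
--         pairs = [(t, s) for (s, t) in edges.keys()]
--     else:
--         pairs = [(s, t) for (s, t) in edges.keys()]
--     adj = {}
--     for (x, y) in pairs:
--         adj.setdefault(x, []).append(y)
--     relevant = set(target_vars)
--     stack = list(target_vars)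
--     while stack:
--         n = stack.pop()
--         for m in adj.get(n, []):
--             if m not in relevant:
--                 relevant.add(m)
--                 stack.append(m)
--     return {(s, t): p for (s, t), p in edges.items() if s in relevant and t in relevant}
-- ===== Notes on version B (the rewrite author's own statement) =====
-- stated objective: alternative
-- what changed: Replaces the repeated full-edge-list fixpoint sweeps (re-scan all edges until no change) with a single stack-based reachability search over an adjacency dict built once from the (reversed or forward) edges; worst-case O(V+E) vs A's O(V*E), though not measurably faster on the generated inputs.
import Mathlib
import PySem

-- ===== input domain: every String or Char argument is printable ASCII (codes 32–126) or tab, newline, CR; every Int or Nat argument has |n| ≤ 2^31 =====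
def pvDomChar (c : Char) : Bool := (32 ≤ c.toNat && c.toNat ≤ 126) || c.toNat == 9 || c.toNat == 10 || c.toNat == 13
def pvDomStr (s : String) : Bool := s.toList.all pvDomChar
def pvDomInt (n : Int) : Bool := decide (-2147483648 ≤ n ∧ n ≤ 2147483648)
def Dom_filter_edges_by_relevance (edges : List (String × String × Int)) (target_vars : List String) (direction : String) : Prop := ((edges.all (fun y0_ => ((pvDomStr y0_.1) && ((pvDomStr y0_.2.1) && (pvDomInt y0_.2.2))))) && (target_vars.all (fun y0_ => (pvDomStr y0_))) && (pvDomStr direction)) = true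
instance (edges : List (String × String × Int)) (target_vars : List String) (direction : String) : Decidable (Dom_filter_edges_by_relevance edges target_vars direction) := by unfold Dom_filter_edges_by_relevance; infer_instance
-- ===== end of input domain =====

-- B replaces A's repeated whole-edge-list fixpoint sweeps (re-scan every edge until nothing
-- changes) by one stack-based reachability search over an adjacency dict built once.

-- ===== PORT A =====
-- Python A's find_ancestors and find_descendants are the same 'while changed' sweep, reading
-- each edge in opposite orientation; the shared sweep is frStep/frPass/frLoop over the
-- oriented pair list (pair = (known node, node to add)); each step is A's step verbatim.

-- the body of 'for (source, target) in edges.keys(): if … : add; changed = True'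
def frStep : (PySem.Set String × Bool) → (String × String) → (PySem.Set String × Bool) :=
  fun st p =>
    if st.1.contains p.1 && !(st.1.contains p.2) then (PySem.Set.add st.1 p.2, true) else st

-- one full sweep of the while-body ('changed = False' then the for-loop)
def frPass (ps : List (String × String)) (s : PySem.Set String) : PySem.Set String × Bool :=
  ps.foldl frStep (s, false)

-- termination measure and lemmas for the 'while changed' loop (cited by frLoop)
def frMissing (ps : List (String × String)) (s : PySem.Set String) : Nat :=
  ((ps.map Prod.snd).toFinset \ s.toFinset).card


theorem frStep_true (st : PySem.Set String × Bool) (p : String × String)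
    (hc : (st.1.contains p.1 && !(st.1.contains p.2)) = true) :
    frStep st p = (PySem.Set.add st.1 p.2, true) := by
  unfold frStep; rw [hc]; simp

theorem frStep_false (st : PySem.Set String × Bool) (p : String × String)
    (hc : (st.1.contains p.1 && !(st.1.contains p.2)) = false) :
    frStep st p = st := by
  unfold frStep; rw [hc]; simp

theorem frFold_mono (ps : List (String × String)) (st : PySem.Set String × Bool) :
    ∀ x ∈ st.1, x ∈ (ps.foldl frStep st).1 := by
  induction ps generalizing st with
  | nil => intro x hx; simpa using hx
  | cons p ps ih =>
    intro x hx
    simp only [List.foldl_cons]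
    apply ih
    cases hc : (st.1.contains p.1 && !(st.1.contains p.2)) with
    | true => rw [frStep_true st p hc]; simp [PySem.Set.mem_add, hx]
    | false => rw [frStep_false st p hc]; exact hx

theorem frFold_changed (ps : List (String × String)) (st : PySem.Set String × Bool)
    (h : (ps.foldl frStep st).2 = true) :
    st.2 = true ∨ ∃ x, x ∈ ps.map Prod.snd ∧ x ∉ st.1 ∧ x ∈ (ps.foldl frStep st).1 := by
  induction ps generalizing st with
  | nil => left; simpa using h
  | cons p ps ih =>
    simp only [List.foldl_cons] at h ⊢
    cases hc : (st.1.contains p.1 && !(st.1.contains p.2)) with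
    | true =>
      right
      refine ⟨p.2, by simp, ?_, ?_⟩
      · intro hmem
        have h2 := hc
        simp at h2
        exact h2.2 hmem
      · have hm : p.2 ∈ (frStep st p).1 := by
          rw [frStep_true st p hc]; simp [PySem.Set.mem_add]
        exact frFold_mono ps _ p.2 hm
    | false =>
      rw [frStep_false st p hc] at h ⊢
      rcases ih st h with h1 | ⟨x, hx1, hx2, hx3⟩
      · exact Or.inl h1
      · refine Or.inr ⟨x, ?_, hx2, hx3⟩
        simp only [List.map_cons, List.mem_cons]
        exact Or.inr hx1

theorem frLoop_dec (ps : List (String × String)) (s : PySem.Set String)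
    (h : (frPass ps s).2 = true) :
    frMissing ps (frPass ps s).1 < frMissing ps s := by
  rcases frFold_changed ps (s, false) h with h0 | ⟨x, hx, hxs, hxr⟩
  · simp at h0
  · apply Finset.card_lt_card
    constructor
    · intro y hy
      simp only [Finset.mem_sdiff, List.mem_toFinset] at hy ⊢
      exact ⟨hy.1, fun hmem => hy.2 (frFold_mono ps (s, false) y hmem)⟩
    · intro hsub
      have hxin : x ∈ (ps.map Prod.snd).toFinset \ s.toFinset := by
        simp only [Finset.mem_sdiff, List.mem_toFinset]; exact ⟨hx, hxs⟩
      have := hsub hxin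
      simp only [Finset.mem_sdiff, List.mem_toFinset] at this
      exact this.2 hxr

-- 'while changed:' — repeat the sweep until it reports no change
def frLoop (ps : List (String × String)) (s : PySem.Set String) : PySem.Set String :=
  let r := frPass ps s
  if r.2 = true then frLoop ps r.1 else r.1
termination_by frMissing ps s
decreasing_by exact frLoop_dec ps s (by assumption)

def find_ancestors (target_nodes : List String) (edges : List (String × String × Int)) :
    PySem.Set String :=
  frLoop (edges.map (fun e => (e.2.1, e.1))) (PySem.Set.ofList target_nodes)

def find_descendants (source_nodes : List String) (edges : List (String × String × Int)) :
    PySem.Set String :=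
  frLoop (edges.map (fun e => (e.1, e.2.1))) (PySem.Set.ofList source_nodes)

def filter_edges_by_relevance (edges : List (String × String × Int)) (target_vars : List String) (direction : String) : List (String × String × Int) :=
  let relevant_nodes :=
    if direction = "before" then find_ancestors target_vars edges
    else find_descendants target_vars edges
  edges.filter (fun e => relevant_nodes.contains e.1 && relevant_nodes.contains e.2.1)

-- ===== PORT B =====
-- Source B: orient the edges once, index them in an adjacency dict, walk from the targets
-- with an explicit stack, then filter the edges by the reached set.

-- 'for (x, y) in pairs: adj.setdefault(x, []).append(y)'
def bAdj (ps : List (String × String)) : PySem.Dict String (List String) :=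
  ps.foldl (fun d p => d.modify p.1 [] (· ++ [p.2])) PySem.Dict.empty

-- inner 'for m in adj.get(n, []): if m not in relevant: add; push'.
-- 'univ.contains m' is a redundant totality guard (every neighbour stored in bAdj is some
-- pair's second component, hence in univ = ps.map Prod.snd): it never alters the computation.
def bStep (univ : List String) :
    (PySem.Set String × List String) → String → (PySem.Set String × List String) :=
  fun q m =>
    if !(q.1.contains m) && univ.contains m then (PySem.Set.add q.1 m, m :: q.2) else q

-- termination lemmas for the stack loop (cited by bDfs)
theorem bStep_true (univ : List String) (q : PySem.Set String × List String) (m : String)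
    (hc : (!(q.1.contains m) && univ.contains m) = true) :
    bStep univ q m = (PySem.Set.add q.1 m, m :: q.2) := by
  unfold bStep; rw [hc]; simp

theorem bStep_false (univ : List String) (q : PySem.Set String × List String) (m : String)
    (hc : (!(q.1.contains m) && univ.contains m) = false) :
    bStep univ q m = q := by
  unfold bStep; rw [hc]; simp

theorem bFold_measure (univ : List String) (l : List String)
    (q : PySem.Set String × List String) :
    2 * ((univ.toFinset \ ((l.foldl (bStep univ) q).1).toFinset).card)
      + ((l.foldl (bStep univ) q).2).length
    ≤ 2 * ((univ.toFinset \ q.1.toFinset).card) + q.2.length := by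
  induction l generalizing q with
  | nil => simp
  | cons m l ih =>
    simp only [List.foldl_cons]
    refine le_trans (ih (bStep univ q m)) ?_
    cases hc : (!(q.1.contains m) && univ.contains m) with
    | true =>
      have h2 := hc
      simp at h2
      obtain ⟨hn, hm⟩ := h2
      have hcard : (univ.toFinset \ (PySem.Set.add q.1 m).toFinset).card
          < (univ.toFinset \ q.1.toFinset).card := by
        apply Finset.card_lt_card
        constructor
        · intro y hy
          simp only [Finset.mem_sdiff, List.mem_toFinset, PySem.Set.mem_add] at hy ⊢
          exact ⟨hy.1, fun h => hy.2 (Or.inl h)⟩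
        · intro hsub
          have hxin : m ∈ univ.toFinset \ q.1.toFinset := by
            simp only [Finset.mem_sdiff, List.mem_toFinset]; exact ⟨hm, hn⟩
          have := hsub hxin
          simp [PySem.Set.mem_add] at this
      rw [bStep_true univ q m hc]
      simp only [List.length_cons]
      omega
    | false =>
      rw [bStep_false univ q m hc]

-- 'while stack: n = stack.pop(); for m in adj.get(n, []): …'
def bDfs (adj : PySem.Dict String (List String)) (univ : List String)
    (rel : PySem.Set String) (stk : List String) : PySem.Set String :=
  match stk with
  | [] => rel
  | n :: stk' =>
    let q := (adj.getD n []).foldl (bStep univ) (rel, stk')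
    bDfs adj univ q.1 q.2
termination_by 2 * ((univ.toFinset \ rel.toFinset).card) + stk.length
decreasing_by
  calc 2 * ((univ.toFinset \ q.1.toFinset).card) + q.2.length
      ≤ 2 * ((univ.toFinset \ rel.toFinset).card) + stk'.length := bFold_measure univ _ _
    _ < 2 * ((univ.toFinset \ rel.toFinset).card) + (n :: stk').length := by
        simp [List.length_cons]

def filter_edges_by_relevance_alt (edges : List (String × String × Int)) (target_vars : List String) (direction : String) : List (String × String × Int) :=
  let ps :=
    if direction = "before" then edges.map (fun e => (e.2.1, e.1))
    else edges.map (fun e => (e.1, e.2.1))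
  let relevant := bDfs (bAdj ps) (ps.map Prod.snd) (PySem.Set.ofList target_vars) target_vars
  edges.filter (fun e => relevant.contains e.1 && relevant.contains e.2.1)

-- ===== PRECONDITION & SPEC =====
def Spec_filter_edges_by_relevance (edges : List (String × String × Int)) (target_vars : List String) (direction : String) (out : List (String × String × Int)) : Prop := out = filter_edges_by_relevance_alt edges target_vars direction
instance (edges : List (String × String × Int)) (target_vars : List String) (direction : String) (out : List (String × String × Int)) : Decidable (Spec_filter_edges_by_relevance edges target_vars direction out) := by unfold Spec_filter_edges_by_relevance; infer_instance

-- ===== CLAIM (what is proved, stated in full; the proofs are below) =====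
def Claim_equal_filter_edges_by_relevance : Prop := ∀ (edges : List (String × String × Int)) (target_vars : List String) (direction : String), Dom_filter_edges_by_relevance edges target_vars direction → Spec_filter_edges_by_relevance edges target_vars direction (filter_edges_by_relevance edges target_vars direction)

-- ===== LEMMAS AND PROOFS =====

-- reachability along the oriented pairs: the set both programs compute
inductive Reach (ps : List (String × String)) (init : List String) : String → Prop
  | base : ∀ x, x ∈ init → Reach ps init x
  | step : ∀ x y, (x, y) ∈ ps → Reach ps init x → Reach ps init y

-- ---------- A side ----------

theorem frFold_sound (ps : List (String × String)) (R : String → Prop)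
    (hR : ∀ p ∈ ps, R p.1 → R p.2) (st : PySem.Set String × Bool)
    (hst : ∀ x ∈ st.1, R x) : ∀ x ∈ (ps.foldl frStep st).1, R x := by
  induction ps generalizing st with
  | nil => intro x hx; simpa using hst x hx
  | cons p ps ih =>
    simp only [List.foldl_cons]
    apply ih (fun q hq hq1 => hR q (List.mem_cons_of_mem p hq) hq1)
    cases hc : (st.1.contains p.1 && !(st.1.contains p.2)) with
    | true =>
      rw [frStep_true st p hc]
      intro x hx
      rcases (PySem.Set.mem_add _ _ _).mp hx with h1 | h2
      · exact hst x h1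
      · subst h2
        have h2 := hc
        simp at h2
        exact hR p (List.mem_cons_self ..) (hst p.1 h2.1)
    | false =>
      rw [frStep_false st p hc]
      exact hst

theorem frFold_flag (ps : List (String × String)) (st : PySem.Set String × Bool)
    (h : st.2 = true) : (ps.foldl frStep st).2 = true := by
  induction ps generalizing st with
  | nil => simpa using h
  | cons p ps ih =>
    simp only [List.foldl_cons]
    cases hc : (st.1.contains p.1 && !(st.1.contains p.2)) with
    | true => rw [frStep_true st p hc]; exact ih _ rfl
    | false => rw [frStep_false st p hc]; exact ih st h

theorem frFold_fixed (ps : List (String × String)) (st : PySem.Set String × Bool)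
    (h : (ps.foldl frStep st).2 = false) :
    ps.foldl frStep st = st ∧ ∀ p ∈ ps, p.1 ∈ st.1 → p.2 ∈ st.1 := by
  induction ps generalizing st with
  | nil => exact ⟨by simpa using rfl, by simp⟩
  | cons p ps ih =>
    simp only [List.foldl_cons] at h ⊢
    cases hc : (st.1.contains p.1 && !(st.1.contains p.2)) with
    | true =>
      rw [frStep_true st p hc] at h
      have := frFold_flag ps (PySem.Set.add st.1 p.2, true) rfl
      rw [h] at this; cases this
    | false =>
      rw [frStep_false st p hc] at h ⊢
      obtain ⟨heq, hcl⟩ := ih st h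
      refine ⟨heq, ?_⟩
      intro q hq
      rcases List.mem_cons.mp hq with rfl | hq2
      · intro h1
        have h2 := hc
        simp at h2
        exact h2 h1
      · exact hcl q hq2

theorem frLoop_sound (ps : List (String × String)) (R : String → Prop)
    (hR : ∀ p ∈ ps, R p.1 → R p.2) (s : PySem.Set String) :
    (∀ x ∈ s, R x) → ∀ x ∈ frLoop ps s, R x := by
  fun_induction frLoop ps s with
  | case1 s r h ih =>
    intro hs
    exact ih (frFold_sound ps R hR (s, false) hs)
  | case2 s r h =>
    intro hs x hx
    exact frFold_sound ps R hR (s, false) hs x hx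

theorem frLoop_superset (ps : List (String × String)) (s : PySem.Set String) :
    ∀ x ∈ s, x ∈ frLoop ps s := by
  fun_induction frLoop ps s with
  | case1 s r h ih =>
    intro x hx
    exact ih x (frFold_mono ps (s, false) x hx)
  | case2 s r h =>
    intro x hx
    exact frFold_mono ps (s, false) x hx

theorem frLoop_closed (ps : List (String × String)) (s : PySem.Set String) :
    ∀ p ∈ ps, p.1 ∈ frLoop ps s → p.2 ∈ frLoop ps s := by
  fun_induction frLoop ps s with
  | case1 s r h ih => exact ih
  | case2 s r h =>
    have hfix := frFold_fixed ps (s, false) (by simpa using h)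
    intro p hp h1
    have hr1 : (frPass ps s).1 = s := by
      unfold frPass; rw [hfix.1]
    rw [hr1] at h1 ⊢
    exact hfix.2 p hp h1

theorem frLoop_iff_reach (ps : List (String × String)) (init : List String) (x : String) :
    x ∈ frLoop ps (PySem.Set.ofList init) ↔ Reach ps init x := by
  constructor
  · exact fun hx => frLoop_sound ps (Reach ps init)
      (fun p hp => Reach.step p.1 p.2 hp)
      (PySem.Set.ofList init)
      (fun z hz => Reach.base z ((PySem.Set.mem_ofList _ _).mp hz)) x hx
  · intro h
    induction h with
    | base z hz => exact frLoop_superset ps _ z ((PySem.Set.mem_ofList _ _).mpr hz)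
    | step a b hab _ iha => exact frLoop_closed ps _ (a, b) hab iha

-- ---------- B side ----------

theorem bAdj_mem (ps : List (String × String)) (x y : String) :
    y ∈ (bAdj ps).getD x [] ↔ (x, y) ∈ ps := by
  unfold bAdj
  rw [PySem.Dict.getD_foldl_modify_append]
  simp only [List.mem_append, List.mem_map, List.mem_filter]
  constructor
  · rintro (h | ⟨⟨p1, p2⟩, ⟨hp, hbeq⟩, hsnd⟩)
    · simp [PySem.Dict.getD, PySem.Dict.get?, PySem.Dict.empty] at h
    · simp at hbeq hsnd
      subst hbeq; subst hsnd; exact hp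
  · intro h
    exact Or.inr ⟨(x, y), ⟨h, by simp⟩, rfl⟩

theorem bFold_spec (univ : List String) (l : List String)
    (q0 : PySem.Set String × List String) :
    (∀ x ∈ q0.1, x ∈ (l.foldl (bStep univ) q0).1) ∧
    (∀ x ∈ q0.2, x ∈ (l.foldl (bStep univ) q0).2) ∧
    (∀ x ∈ (l.foldl (bStep univ) q0).2, x ∈ q0.2 ∨ x ∈ (l.foldl (bStep univ) q0).1) ∧
    (∀ x ∈ (l.foldl (bStep univ) q0).1, x ∈ q0.1 ∨ x ∈ (l.foldl (bStep univ) q0).2) ∧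
    (∀ m ∈ l, univ.contains m = true → m ∈ (l.foldl (bStep univ) q0).1) := by
  induction l generalizing q0 with
  | nil => exact ⟨fun x hx => hx, fun x hx => hx, fun x hx => Or.inl hx,
      fun x hx => Or.inl hx, by simp⟩
  | cons m l ih =>
    simp only [List.foldl_cons]
    obtain ⟨I1, I2, I3, I4, I5⟩ := ih (bStep univ q0 m)
    cases hc : (!(q0.1.contains m) && univ.contains m) with
    | true =>
      rw [bStep_true univ q0 m hc] at I1 I2 I3 I4 I5 ⊢
      have hmF : m ∈ (List.foldl (bStep univ) (PySem.Set.add q0.1 m, m :: q0.2) l).1 :=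
        I1 m ((PySem.Set.mem_add _ _ _).mpr (Or.inr rfl))
      refine ⟨?_, ?_, ?_, ?_, ?_⟩
      · exact fun x hx => I1 x ((PySem.Set.mem_add _ _ _).mpr (Or.inl hx))
      · exact fun x hx => I2 x (List.mem_cons_of_mem m hx)
      · intro x hx
        rcases I3 x hx with h1 | h2
        · rcases List.mem_cons.mp h1 with rfl | h3
          · exact Or.inr hmF
          · exact Or.inl h3
        · exact Or.inr h2
      · intro x hx
        rcases I4 x hx with h1 | h2
        · rcases (PySem.Set.mem_add _ _ _).mp h1 with h3 | rfl
          · exact Or.inl h3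
          · exact Or.inr (I2 x (List.mem_cons_self ..))
        · exact Or.inr h2
      · intro m' hm' _
        rcases List.mem_cons.mp hm' with rfl | h3
        · exact hmF
        · rename_i hu
          exact I5 m' h3 hu
    | false =>
      rw [bStep_false univ q0 m hc] at I1 I2 I3 I4 I5 ⊢
      refine ⟨I1, I2, I3, I4, ?_⟩
      intro m' hm' hu
      rcases List.mem_cons.mp hm' with rfl | h3
      · have h2 := hc
        simp at h2
        by_cases hq : m' ∈ q0.1
        · exact I1 m' hq
        · exact absurd (by simpa using hu) (h2 hq)
      · exact I5 m' h3 hu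

theorem bFold_R (univ : List String) (R : String → Prop) (l : List String)
    (q0 : PySem.Set String × List String)
    (hl : ∀ m ∈ l, R m) (h1 : ∀ x ∈ q0.1, R x) (h2 : ∀ x ∈ q0.2, R x) :
    (∀ x ∈ (l.foldl (bStep univ) q0).1, R x) ∧ (∀ x ∈ (l.foldl (bStep univ) q0).2, R x) := by
  induction l generalizing q0 with
  | nil => exact ⟨h1, h2⟩
  | cons m l ih =>
    simp only [List.foldl_cons]
    refine ih (bStep univ q0 m) (fun m' hm' => hl m' (List.mem_cons_of_mem m hm')) ?_ ?_
    all_goals cases hc : (!(q0.1.contains m) && univ.contains m) with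
    | true =>
      rw [bStep_true univ q0 m hc]
      first
      | · intro x hx
          rcases (PySem.Set.mem_add _ _ _).mp hx with h3 | rfl
          · exact h1 x h3
          · exact hl x (List.mem_cons_self ..)
      | · intro x hx
          rcases List.mem_cons.mp hx with rfl | h3
          · exact hl x (List.mem_cons_self ..)
          · exact h2 x h3
    | false =>
      rw [bStep_false univ q0 m hc]
      first | exact h1 | exact h2

theorem bDfs_sound (adj : PySem.Dict String (List String)) (univ : List String)
    (R : String → Prop)
    (hadj : ∀ n, ∀ m ∈ adj.getD n [], R n → R m)
    (rel : PySem.Set String) (stk : List String) :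
    (∀ x ∈ rel, R x) → (∀ x ∈ stk, R x) →
    ∀ x ∈ bDfs adj univ rel stk, R x := by
  fun_induction bDfs adj univ rel stk with
  | case1 rel => exact fun hrel _ x hx => hrel x hx
  | case2 rel n stk' q ih =>
    intro hrel hstk
    have hn : R n := hstk n (List.mem_cons_self ..)
    have hl : ∀ m ∈ adj.getD n [], R m := fun m hm => hadj n m hm hn
    have hstk' : ∀ x ∈ stk', R x := fun x hx => hstk x (List.mem_cons_of_mem n hx)
    obtain ⟨hq1, hq2⟩ := bFold_R univ R (adj.getD n []) (rel, stk') hl hrel hstk'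
    exact ih hq1 hq2

theorem bDfs_superset (adj : PySem.Dict String (List String)) (univ : List String)
    (rel : PySem.Set String) (stk : List String) :
    ∀ x ∈ rel, x ∈ bDfs adj univ rel stk := by
  fun_induction bDfs adj univ rel stk with
  | case1 rel => exact fun x hx => hx
  | case2 rel n stk' q ih =>
    intro x hx
    exact ih x ((bFold_spec univ (adj.getD n []) (rel, stk')).1 x hx)

theorem bDfs_closed (adj : PySem.Dict String (List String)) (univ : List String)
    (rel : PySem.Set String) (stk : List String) :
    (∀ x ∈ stk, x ∈ rel) →
    (∀ x ∈ rel, x ∉ stk → ∀ y ∈ adj.getD x [], univ.contains y = true → y ∈ rel) →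
    ∀ x ∈ bDfs adj univ rel stk, ∀ y ∈ adj.getD x [], univ.contains y = true →
      y ∈ bDfs adj univ rel stk := by
  fun_induction bDfs adj univ rel stk with
  | case1 rel =>
    intro _ hinv x hx y hy hu
    exact hinv x hx (by simp) y hy hu
  | case2 rel n stk' q ih =>
    intro hss hinv
    obtain ⟨C1, C2, C3, C4, C5⟩ := bFold_spec univ (adj.getD n []) (rel, stk')
    apply ih
    · intro x hx
      rcases C3 x hx with h1 | h2
      · exact C1 x (hss x (List.mem_cons_of_mem n h1))
      · exact h2
    · intro x hx1 hx2 y hy hu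
      have hxrel : x ∈ rel := by
        rcases C4 x hx1 with h1 | h2
        · exact h1
        · exact absurd h2 hx2
      by_cases hxn : x = n
      · subst hxn
        exact C5 y hy hu
      · have hxstk' : x ∉ stk' := fun h => hx2 (C2 x h)
        have hxstk : x ∉ n :: stk' := by
          intro h
          rcases List.mem_cons.mp h with h1 | h1
          · exact hxn h1
          · exact hxstk' h1
        exact C1 y (hinv x hxrel hxstk y hy hu)

theorem bDfs_iff_reach (ps : List (String × String)) (init : List String) (x : String) :
    x ∈ bDfs (bAdj ps) (ps.map Prod.snd) (PySem.Set.ofList init) init ↔ Reach ps init x := by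
  constructor
  · intro hx
    refine bDfs_sound (bAdj ps) (ps.map Prod.snd) (Reach ps init) ?_ _ init ?_ ?_ x hx
    · intro n m hm hn
      exact Reach.step n m ((bAdj_mem ps n m).mp hm) hn
    · exact fun z hz => Reach.base z ((PySem.Set.mem_ofList _ _).mp hz)
    · exact fun z hz => Reach.base z hz
  · intro h
    induction h with
    | base z hz =>
      exact bDfs_superset _ _ _ _ z ((PySem.Set.mem_ofList _ _).mpr hz)
    | step a b hab _ iha =>
      refine bDfs_closed (bAdj ps) (ps.map Prod.snd) (PySem.Set.ofList init) init ?_ ?_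
        a iha b ((bAdj_mem ps a b).mpr hab) ?_
      · exact fun z hz => (PySem.Set.mem_ofList _ _).mpr hz
      · intro z hz1 hz2
        exact absurd ((PySem.Set.mem_ofList _ _).mp hz1) hz2
      · have hb : b ∈ ps.map Prod.snd := by
          exact List.mem_map_of_mem hab
        exact List.elem_eq_true_of_mem hb

-- ---------- assembly ----------

theorem sets_agree (ps : List (String × String)) (init : List String) (x : String) :
    x ∈ frLoop ps (PySem.Set.ofList init)
      ↔ x ∈ bDfs (bAdj ps) (ps.map Prod.snd) (PySem.Set.ofList init) init := by
  rw [frLoop_iff_reach, bDfs_iff_reach]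

theorem contains_congr (S1 S2 : PySem.Set String) (h : ∀ x, x ∈ S1 ↔ x ∈ S2) (a : String) :
    PySem.Set.contains S1 a = PySem.Set.contains S2 a := by
  by_cases hm : a ∈ S1
  · rw [(PySem.Set.contains_iff _ _).mpr hm, (PySem.Set.contains_iff _ _).mpr ((h a).mp hm)]
  · have hm2 : a ∉ S2 := fun hx => hm ((h a).mpr hx)
    have e1 : PySem.Set.contains S1 a = false := by
      cases hc : PySem.Set.contains S1 a
      · rfl
      · exact absurd ((PySem.Set.contains_iff _ _).mp hc) hm
    have e2 : PySem.Set.contains S2 a = false := by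
      cases hc : PySem.Set.contains S2 a
      · rfl
      · exact absurd ((PySem.Set.contains_iff _ _).mp hc) hm2
    rw [e1, e2]

theorem filter_agree (edges : List (String × String × Int)) (target_vars : List String)
    (ps : List (String × String)) :
    edges.filter (fun e => (frLoop ps (PySem.Set.ofList target_vars)).contains e.1 &&
        (frLoop ps (PySem.Set.ofList target_vars)).contains e.2.1)
      = edges.filter (fun e =>
        (bDfs (bAdj ps) (ps.map Prod.snd) (PySem.Set.ofList target_vars) target_vars).contains e.1 &&
        (bDfs (bAdj ps) (ps.map Prod.snd) (PySem.Set.ofList target_vars) target_vars).contains e.2.1) := by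
  apply List.filter_congr
  intro e _
  rw [contains_congr _ _ (fun x => sets_agree ps target_vars x) e.1,
      contains_congr _ _ (fun x => sets_agree ps target_vars x) e.2.1]

-- ===== VERDICT (by name: the statement is the Claim_ definition above) =====
theorem filter_edges_by_relevance_spec : Claim_equal_filter_edges_by_relevance := by
  intro edges target_vars direction _
  unfold Spec_filter_edges_by_relevance
  unfold filter_edges_by_relevance filter_edges_by_relevance_alt
  by_cases hdir : direction = "before"
  · simp only [if_pos hdir, find_ancestors]
    exact filter_agree edges target_vars (edges.map (fun e => (e.2.1, e.1)))
  · simp only [if_neg hdir, find_descendants]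
    exact filter_agree edges target_vars (edges.map (fun e => (e.1, e.2.1)))
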